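-- pv_equiv track=rewrite | github.com/IHateChem/Algo_practice | 프로그래머스/lv2/92342. 양궁대회/양궁대회.py | solution
-- ===== SOURCE A (Python) =====
-- def solution(n, info):
--     answer = [-1]
--     maxDiff = 0
--     score = range(10,-1,-1)
--     possible = []
--     for i in info:
--         possible.append((i+1,0))
--     stack = [(0,0, [])] #화살 쏜 개수, 점수차, 기록
--     t = []
--     for i in range(10,-1,-1):
--         for num, scoreDiff, record in stack:
--             for p in possible[i]:
--                 if num + p >n: continue
--                 t.append((num+p, scoreDiff + score[i] * (1 if p > info[i] else -1) *(1 if info[i] or p else 0), [r for r in record]+[p]))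
--         stack = t
--         t = []
--     for i, d, r in stack:
--         if d > maxDiff:
--             answer=  r
--             maxDiff = d
--     answer.reverse()
--     if sum(answer) != -1 and sum(answer) < n:
--         d = n- sum(answer)
--         answer[-1] += d
--     return answer
-- ===== SOURCE B (Python) =====
-- def solution(n, info):
--     # DFS/backtracking over positions 10..0 instead of A's level-by-level stack expansion.
--     best = [0, None]  # best score-difference so far, and its record (positions 10..0)
--
--     def dfs(i, used, diff, rec):
--         if i < 0:
--             if diff > best[0]:
--                 best[0] = diff
--                 best[1] = rec
--             return
--         for p in (info[i] + 1, 0):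
--             if used + p > n:
--                 continue
--             gain = (10 - i) * (1 if p > info[i] else -1) * (1 if info[i] or p else 0)
--             dfs(i - 1, used + p, diff + gain, rec + [p])
--
--     dfs(10, 0, 0, [])
--     answer = [-1] if best[1] is None else best[1][::-1]
--     s = sum(answer)
--     if s != -1 and s < n:
--         answer[-1] += n - s
--     return answer
-- ===== Notes on version B (the rewrite author's own statement) =====
-- stated objective: alternative
-- what changed: Replaces A's breadth-first level-by-level stack expansion (materialising every partial distribution of each round as copied lists) with a recursive depth-first backtracking search over positions 10..0 that threads the running arrow count, score difference and best-so-far result.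
import Mathlib
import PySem

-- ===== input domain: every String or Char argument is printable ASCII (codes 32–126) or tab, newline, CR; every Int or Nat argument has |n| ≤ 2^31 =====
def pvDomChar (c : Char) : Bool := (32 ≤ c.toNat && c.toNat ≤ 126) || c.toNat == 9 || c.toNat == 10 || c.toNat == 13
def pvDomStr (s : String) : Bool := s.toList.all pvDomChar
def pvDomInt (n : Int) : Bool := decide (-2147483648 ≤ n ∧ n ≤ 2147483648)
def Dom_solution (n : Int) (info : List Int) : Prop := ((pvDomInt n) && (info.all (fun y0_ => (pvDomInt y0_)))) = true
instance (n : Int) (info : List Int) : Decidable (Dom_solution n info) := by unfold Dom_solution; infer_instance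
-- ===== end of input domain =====

-- B replaces A's level-by-level stack expansion with a recursive DFS threading the best result (alternative decomposition; same return values).

-- ===== PORT A =====
def solution (n : Int) (info : List Int) : List Int :=
  let score := PySem.List.pyRange 10 (-1) (-1)
  let possible := info.foldl (fun acc i => acc ++ [(i + 1, (0 : Int))]) ([] : List (Int × Int))
  let stack :=
    (PySem.List.pyRange 10 (-1) (-1)).foldl (fun stack i =>
      stack.foldl (fun t e =>
        let pr := (PySem.List.pyGet? possible i).getD (0, 0)
        [pr.1, pr.2].foldl (fun t p =>
          if e.1 + p > n then t
          else t ++ [(e.1 + p,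
            e.2.1 + ((PySem.List.pyGet? score i).getD 0)
              * (if (PySem.List.pyGet? info i).getD 0 < p then 1 else -1)
              * (if (PySem.List.pyGet? info i).getD 0 ≠ 0 ∨ p ≠ 0 then 1 else 0),
            e.2.2 ++ [p])]) t) ([] : List (Int × Int × List Int)))
      [((0 : Int), (0 : Int), ([] : List Int))]
  let res := stack.foldl (fun acc e => if acc.2 < e.2.1 then (e.2.2, e.2.1) else acc)
    (([-1] : List Int), (0 : Int))
  let answer := res.1.reverse
  if answer.sum ≠ -1 ∧ answer.sum < n then
    answer.dropLast ++ [answer.getLast?.getD 0 + (n - answer.sum)]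
  else answer

-- ===== PORT B =====
-- dfs(i, used, diff, rec) of Source B; the Nat argument is i+1 (fuel 0 ↔ python i = -1).
def dfsAlt (n : Int) (info : List Int) :
    Nat → Int → Int → List Int → Int × Option (List Int) → Int × Option (List Int)
  | 0, _, diff, rec, best => if best.1 < diff then (diff, some rec) else best
  | (i + 1), used, diff, rec, best =>
      let infoI := (PySem.List.pyGet? info (i : Int)).getD 0
      [infoI + 1, (0 : Int)].foldl (fun best p =>
        if used + p > n then best
        else dfsAlt n info i (used + p)
          (diff + (10 - (i : Int)) * (if infoI < p then 1 else -1)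
            * (if infoI ≠ 0 ∨ p ≠ 0 then 1 else 0))
          (rec ++ [p]) best) best

def solution_alt (n : Int) (info : List Int) : List Int :=
  let best := dfsAlt n info 11 0 0 [] (0, none)
  let answer := match best.2 with
    | none => ([-1] : List Int)
    | some rec => rec.reverse
  if answer.sum ≠ -1 ∧ answer.sum < n then
    answer.dropLast ++ [answer.getLast?.getD 0 + (n - answer.sum)]
  else answer

-- ===== PRECONDITION & SPEC =====
-- A raises IndexError (possible[i]) when len(info) < 11; that is the only exclusion.
def Pre_solution (n : Int) (info : List Int) : Prop := 11 ≤ info.length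
instance (n : Int) (info : List Int) : Decidable (Pre_solution n info) := by
  unfold Pre_solution; infer_instance

def pvWitness_solution : Int × List Int := (9, [0, 0, 0, 0, 0, 0, 0, 0, 0, 0, 0])

def Spec_solution (n : Int) (info : List Int) (out : List Int) : Prop := out = solution_alt n info
instance (n : Int) (info : List Int) (out : List Int) : Decidable (Spec_solution n info out) := by
  unfold Spec_solution; infer_instance

-- ===== CLAIM (what is proved, stated in full; the proofs are below) =====
def Claim_equal_solution : Prop :=
  ∀ (n : Int) (info : List Int), Dom_solution n info → Pre_solution n info →
    Spec_solution n info (solution n info)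

-- ===== LEMMAS AND PROOFS =====

-- the child state produced when Ryan shoots p arrows at position i (value 10 - i)
def childE (info : List Int) (i : Nat) (e : Int × Int × List Int) (p : Int) :
    Int × Int × List Int :=
  let infoI := (PySem.List.pyGet? info (i : Int)).getD 0
  (e.1 + p,
   e.2.1 + (10 - (i : Int)) * (if infoI < p then 1 else -1)
     * (if infoI ≠ 0 ∨ p ≠ 0 then 1 else 0),
   e.2.2 ++ [p])

def expandE (n : Int) (info : List Int) (i : Nat) (e : Int × Int × List Int) :
    List (Int × Int × List Int) :=
  let infoI := (PySem.List.pyGet? info (i : Int)).getD 0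
  (if e.1 + (infoI + 1) > n then [] else [childE info i e (infoI + 1)]) ++
  (if e.1 + 0 > n then [] else [childE info i e 0])

def leaves (n : Int) (info : List Int) : Nat → (Int × Int × List Int) → List (Int × Int × List Int)
  | 0, e => [e]
  | (i + 1), e => (expandE n info i e).flatMap (leaves n info i)

def updB (best : Int × Option (List Int)) (e : Int × Int × List Int) : Int × Option (List Int) :=
  if best.1 < e.2.1 then (e.2.1, some e.2.2) else best

def updA (acc : List Int × Int) (e : Int × Int × List Int) : List Int × Int :=
  if acc.2 < e.2.1 then (e.2.2, e.2.1) else acc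

-- the body of A's outer loop, named for the lemmas below (reducible: definitionally the
-- lambda appearing in `solution`)
@[reducible] def stepFn (n : Int) (info : List Int) (i : Int)
    (t : List (Int × Int × List Int)) (e : Int × Int × List Int) :
    List (Int × Int × List Int) :=
  let pr := (PySem.List.pyGet? (info.foldl (fun acc i => acc ++ [(i + 1, (0 : Int))])
    ([] : List (Int × Int))) i).getD (0, 0)
  [pr.1, pr.2].foldl (fun t p =>
    if e.1 + p > n then t
    else t ++ [(e.1 + p,
      e.2.1 + ((PySem.List.pyGet? (PySem.List.pyRange 10 (-1) (-1)) i).getD 0)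
        * (if (PySem.List.pyGet? info i).getD 0 < p then 1 else -1)
        * (if (PySem.List.pyGet? info i).getD 0 ≠ 0 ∨ p ≠ 0 then 1 else 0),
      e.2.2 ++ [p])]) t

theorem dfsAlt_eq_foldl (n : Int) (info : List Int) :
    ∀ (i : Nat) (used diff : Int) (rec : List Int) (best : Int × Option (List Int)),
      dfsAlt n info i used diff rec best =
        (leaves n info i (used, diff, rec)).foldl updB best := by
  intro i
  induction i with
  | zero => intro used diff rec best; simp [dfsAlt, leaves, updB]
  | succ i ih =>
      intro used diff rec best
      simp only [dfsAlt, leaves, expandE, childE, List.foldl_cons, List.foldl_nil]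
      by_cases h1 : used + ((PySem.List.pyGet? info (i : Int)).getD 0 + 1) > n <;>
        by_cases h2 : used + 0 > n <;>
        simp only [h1, h2, ih, List.flatMap_cons, List.flatMap_nil,
          List.foldl_nil, List.nil_append, List.append_nil, if_pos, if_neg] <;>
        simp_all

theorem score_at (i : Nat) (h : i < 11) :
    (PySem.List.pyGet? (PySem.List.pyRange 10 (-1) (-1)) (i : Int)).getD 0 = 10 - (i : Int) := by
  interval_cases i <;> decide

theorem possible_eq (info : List Int) :
    info.foldl (fun acc i => acc ++ [(i + 1, (0 : Int))]) ([] : List (Int × Int)) =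
      info.map (fun x => (x + 1, (0 : Int))) := by
  have h : ∀ (l : List Int) (acc : List (Int × Int)),
      l.foldl (fun acc i => acc ++ [(i + 1, (0 : Int))]) acc =
        acc ++ l.map (fun x => (x + 1, (0 : Int))) := by
    intro l
    induction l with
    | nil => simp
    | cons x xs ih => intro acc; simp [ih]
  simpa using h info []

theorem possible_at (info : List Int) (i : Nat) (hlen : 11 ≤ info.length) (h : i < 11) :
    (PySem.List.pyGet? (info.foldl (fun acc i => acc ++ [(i + 1, (0 : Int))])
        ([] : List (Int × Int))) (i : Int)).getD (0, 0) =
      ((PySem.List.pyGet? info (i : Int)).getD 0 + 1, (0 : Int)) := by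
  rw [possible_eq]
  have hi : i < info.length := by omega
  simp [PySem.List.pyGet?_natCast, List.getElem?_eq_getElem hi]

-- one iteration of A's inner double loop appends exactly the expansion of e at position i
theorem stepFn_body (n : Int) (info : List Int) (i : Nat) (hlen : 11 ≤ info.length)
    (h : i < 11) (t : List (Int × Int × List Int)) (e : Int × Int × List Int) :
    stepFn n info (i : Int) t e = t ++ expandE n info i e := by
  simp only [stepFn]
  rw [possible_at info i hlen h, score_at i h]
  simp only [expandE, childE, List.foldl_cons, List.foldl_nil,
    PySem.List.pyGet?_natCast, gt_iff_lt, add_zero]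
  by_cases h1 : n < e.1 + (info[i]?.getD 0 + 1) <;>
    by_cases h2 : n < e.1 <;> simp [h1, h2]

-- one level of A's loop, at in-range index i, maps the stack through expandE
theorem level_step (n : Int) (info : List Int) (i : Nat) (hlen : 11 ≤ info.length)
    (h : i < 11) (s : List (Int × Int × List Int)) :
    s.foldl (stepFn n info (i : Int)) [] = s.flatMap (expandE n info i) := by
  have gen : ∀ (s' t : List (Int × Int × List Int)),
      s'.foldl (stepFn n info (i : Int)) t = t ++ s'.flatMap (expandE n info i) := by
    intro s'
    induction s' with
    | nil => intro t; simp
    | cons x xs ih =>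
        intro t
        rw [List.foldl_cons, stepFn_body n info i hlen h, ih, List.flatMap_cons,
          List.append_assoc]
  simpa using gen s []

theorem levels (n : Int) (info : List Int) (hlen : 11 ≤ info.length) :
    ∀ (k : Nat), k ≤ 11 → ∀ (s : List (Int × Int × List Int)),
      (PySem.List.pyRange ((k : Int) - 1) (-1) (-1)).foldl
          (fun stack i => stack.foldl (stepFn n info i) []) s =
        s.flatMap (leaves n info k) := by
  intro k
  induction k with
  | zero =>
      intro _ s
      rw [show ((0 : Nat) : Int) - 1 = -1 by norm_num,
        PySem.List.pyRange_neg_one_eq_nil (by norm_num)]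
      simp [leaves]
  | succ k ih =>
      intro hk s
      rw [show ((k + 1 : Nat) : Int) - 1 = (k : Int) by push_cast; ring,
        PySem.List.pyRange_neg_one_cons (by omega : (-1 : Int) < (k : Int))]
      simp only [List.foldl_cons]
      rw [level_step n info k hlen (by omega), ih (by omega), List.flatMap_assoc]
      rfl

theorem levels11 (n : Int) (info : List Int) (hlen : 11 ≤ info.length)
    (s : List (Int × Int × List Int)) :
    (PySem.List.pyRange 10 (-1) (-1)).foldl
        (fun stack i => stack.foldl (stepFn n info i) []) s =
      s.flatMap (leaves n info 11) := by
  have h := levels n info hlen 11 (by omega) s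
  rw [show ((11 : Nat) : Int) - 1 = 10 by norm_num] at h
  exact h

theorem fold_rel :
    ∀ (l : List (Int × Int × List Int)) (a : List Int × Int) (b : Int × Option (List Int)),
      a.2 = b.1 → (b.2 = none → a.1 = [-1]) → (∀ r, b.2 = some r → a.1 = r) →
      (l.foldl updA a).2 = (l.foldl updB b).1 ∧
        ((l.foldl updB b).2 = none → (l.foldl updA a).1 = [-1]) ∧
        (∀ r, (l.foldl updB b).2 = some r → (l.foldl updA a).1 = r) := by
  intro l
  induction l with
  | nil => intro a b h1 h2 h3; exact ⟨h1, h2, h3⟩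
  | cons x xs ih =>
      intro a b h1 h2 h3
      simp only [List.foldl_cons]
      apply ih
      · simp only [updA, updB, h1]; split_ifs <;> first | rfl | exact h1
      · simp only [updA, updB, ← h1]; split_ifs <;> simp_all
      · simp only [updA, updB, ← h1]; split_ifs <;> simp_all

-- ===== VERDICT (by name: the statement is the Claim_ definition above) =====
theorem solution_spec : Claim_equal_solution := by
  intro n info _ hpre
  unfold Spec_solution
  have hlen : 11 ≤ info.length := hpre
  simp only [solution, solution_alt]
  rw [levels11 n info hlen [((0 : Int), (0 : Int), ([] : List Int))], dfsAlt_eq_foldl]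
  simp only [List.flatMap_cons, List.flatMap_nil, List.append_nil]
  set L := leaves n info 11 (0, 0, ([] : List Int)) with hL
  have hrel := fold_rel L (([-1] : List Int), (0 : Int)) ((0 : Int), (none : Option (List Int)))
    rfl (fun _ => rfl) (by intro r h; simp at h)
  rcases hb : (L.foldl updB ((0 : Int), (none : Option (List Int)))).2 with _ | r
  · have ha : (L.foldl updA (([-1] : List Int), (0 : Int))).1 = [-1] := hrel.2.1 hb
    rw [show (fun (acc : List Int × Int) (e : Int × Int × List Int) =>
          if acc.2 < e.2.1 then (e.2.2, e.2.1) else acc) = updA from rfl]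
    rw [ha]
    norm_num
  · have ha : (L.foldl updA (([-1] : List Int), (0 : Int))).1 = r := hrel.2.2 r hb
    rw [show (fun (acc : List Int × Int) (e : Int × Int × List Int) =>
          if acc.2 < e.2.1 then (e.2.2, e.2.1) else acc) = updA from rfl]
    rw [ha]
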